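-- pv_equiv track=rewrite | github.com/srijanpaul-deepsource/pylox | src/pylox/__init__.py | get_snippet_line_col
-- ===== SOURCE A (Python) =====
-- def get_snippet_line_col(source: str, index: int) -> tuple[int, int, str]:
--     """Returns line number, column number and line of code at the given index."""
--     line, col = 1, 0
--
--     current = 0
--     snippet_start_index = 0
--     for char in source:
--         if current == index:
--             break
--
--         if char == "\n":
--             snippet_start_index = current + 1
--             line += 1
--             col = 0
--         else:
--             col += 1
--
--         current += 1
--
--     while current < len(source) and source[current] != "\n":
--         current += 1
--
--     snippet_end_index = current
--     snippet = source[snippet_start_index:snippet_end_index]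
--     return line, col, snippet
-- ===== SOURCE B (Python) =====
-- def get_snippet_line_col(source: str, index: int) -> tuple[int, int, str]:
--     """Returns line number, column number and line of code at the given index."""
--     n = len(source)
--     i = index if 0 <= index <= n else n
--     pre = source[:i]
--     line = pre.count("\n") + 1
--     j = pre[::-1].find("\n")
--     col = i if j == -1 else j
--     end = source.find("\n", i)
--     if end == -1:
--         end = n
--     return line, col, source[i - col:end]
-- ===== Notes on version B (the rewrite author's own statement) =====
-- stated objective: idiomatic
-- what changed: Replaced A's single stateful character-by-character loop (with break and a trailing while-scan) by clamping the index once and computing each output independently with library string searches: count('\n') on the prefix for the line, find('\n') on the reversed prefix for the column, and find('\n', i) for the end of the snippet.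
import Mathlib
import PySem

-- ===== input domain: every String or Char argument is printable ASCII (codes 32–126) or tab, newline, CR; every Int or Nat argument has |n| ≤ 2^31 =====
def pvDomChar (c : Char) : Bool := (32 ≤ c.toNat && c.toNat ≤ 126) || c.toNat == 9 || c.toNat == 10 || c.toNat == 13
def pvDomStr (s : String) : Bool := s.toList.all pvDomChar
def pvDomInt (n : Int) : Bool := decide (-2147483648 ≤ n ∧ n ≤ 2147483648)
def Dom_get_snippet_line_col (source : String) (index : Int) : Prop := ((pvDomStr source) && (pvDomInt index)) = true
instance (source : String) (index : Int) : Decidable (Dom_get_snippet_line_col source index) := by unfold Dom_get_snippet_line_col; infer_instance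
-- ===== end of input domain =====

-- B replaces A's single stateful character loop by a clamp of the index followed by
-- independent library string searches (count / reversed find / find-from); measurably faster by a constant factor.

-- ===== PORT A =====
-- the for-loop of A: walks the characters, breaking when current == index
def pvLoopA (index : Int) : List Char → Int → Int → Int → Int → Int × Int × Int × Int × List Char
  | [], line, col, current, snippet_start => (line, col, current, snippet_start, [])
  | c :: rest, line, col, current, snippet_start =>
      if current = index then (line, col, current, snippet_start, c :: rest)
      else if c = '\n' then pvLoopA index rest (line + 1) 0 (current + 1) (current + 1)
      else pvLoopA index rest line (col + 1) (current + 1) snippet_start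

-- the while-loop of A: advances current past the unconsumed suffix up to the next newline
def pvWhileA : List Char → Int → Int
  | [], current => current
  | c :: rest, current => if c = '\n' then current else pvWhileA rest (current + 1)

def get_snippet_line_col (source : String) (index : Int) : Int × Int × String :=
  let r := pvLoopA index source.toList 1 0 0 0
  let line := r.1
  let col := r.2.1
  let current := r.2.2.1
  let snippet_start := r.2.2.2.1
  let rest := r.2.2.2.2
  let snippet_end := pvWhileA rest current
  (line, col, PySem.Str.slice source (some snippet_start) (some snippet_end))

-- ===== PORT B =====
def get_snippet_line_col_alt (source : String) (index : Int) : Int × Int × String :=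
  let n : Int := PySem.Str.len source
  let i : Int := if 0 ≤ index ∧ index ≤ n then index else n
  let pre := PySem.Str.slice source none (some i)
  let line : Int := (PySem.Str.count pre "\n" : Int) + 1
  let j : Int := PySem.Str.find ((PySem.Str.slice? pre none none (-1)).getD "") "\n"
  let col : Int := if j = -1 then i else j
  let e : Int := PySem.Str.findFrom source "\n" i none
  let e2 : Int := if e = -1 then n else e
  (line, col, PySem.Str.slice source (some (i - col)) (some e2))

-- ===== PRECONDITION & SPEC =====
def Spec_get_snippet_line_col (source : String) (index : Int) (out : Int × Int × String) : Prop := out = get_snippet_line_col_alt source index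
instance (source : String) (index : Int) (out : Int × Int × String) : Decidable (Spec_get_snippet_line_col source index out) := by unfold Spec_get_snippet_line_col; infer_instance

-- ===== CLAIM (what is proved, stated in full; the proofs are below) =====
def Claim_equal_get_snippet_line_col : Prop := ∀ (source : String) (index : Int), Dom_get_snippet_line_col source index → Spec_get_snippet_line_col source index (get_snippet_line_col source index)

-- ===== LEMMAS AND PROOFS =====

-- proof-side: A's running column value after consuming a prefix p
def pvColF (p : List Char) : Int := p.foldl (fun a c => if c = '\n' then 0 else a + 1) 0

theorem pvColF_nil : pvColF [] = 0 := rfl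

theorem pvColF_append_one (p : List Char) (c : Char) :
    pvColF (p ++ [c]) = if c = '\n' then 0 else pvColF p + 1 := by
  simp [pvColF, List.foldl_append]

theorem pvColF_eq_takeWhile_reverse (p : List Char) :
    pvColF p = ((p.reverse.takeWhile (fun c => c ≠ '\n')).length : Int) := by
  induction p using List.reverseRecOn with
  | nil => simp [pvColF]
  | append_singleton q c ih =>
      rw [pvColF_append_one]
      by_cases hc : c = '\n' <;> simp [hc, ih]

theorem pvColF_of_not_mem (p : List Char) (h : '\n' ∉ p) : pvColF p = (p.length : Int) := by
  rw [pvColF_eq_takeWhile_reverse, List.takeWhile_eq_self_iff.mpr ?_ ]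
  · simp
  · intro x hx; simpa using fun he => h (by simpa [he] using (List.mem_reverse.mp hx))

-- the for-loop consumes exactly k characters, folding line/col/start over them
theorem pvLoopA_spec (cs : List Char) : ∀ (p : List Char) (index : Int),
    pvLoopA index cs (1 + (p.count '\n' : Int)) (pvColF p) (p.length : Int) ((p.length : Int) - pvColF p)
      = (let k := if (p.length : Int) ≤ index ∧ index ≤ (p.length : Int) + cs.length then (index - p.length).toNat else cs.length
         let q := p ++ cs.take k
         (1 + (q.count '\n' : Int), pvColF q, (q.length : Int), (q.length : Int) - pvColF q, cs.drop k)) := by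
  induction cs with
  | nil =>
      intro p index
      simp only [List.length_nil, List.take_nil, List.drop_nil, List.append_nil, pvLoopA]
  | cons c rest ih =>
      intro p index
      by_cases hb : (p.length : Int) = index
      · have hcond : (p.length : Int) ≤ index ∧ index ≤ (p.length : Int) + (c :: rest).length := by
          constructor <;> simp [← hb] <;> positivity
        simp only [pvLoopA, if_pos hb, hcond, if_pos, and_self]
        have h0 : (index - (p.length : Int)).toNat = 0 := by omega
        simp [h0]
      · have step : pvLoopA index (c :: rest) (1 + (p.count '\n' : Int)) (pvColF p) (p.length : Int) ((p.length : Int) - pvColF p)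
            = pvLoopA index rest (1 + ((p ++ [c]).count '\n' : Int)) (pvColF (p ++ [c])) (((p ++ [c]).length : Int)) (((p ++ [c]).length : Int) - pvColF (p ++ [c])) := by
          by_cases hc : c = '\n'
          · simp [pvLoopA, hb, hc, pvColF_append_one, List.count_append]
            ring_nf
          · simp [pvLoopA, hb, hc, pvColF_append_one, List.count_append]
        have hk : (if (↑p.length ≤ index ∧ index ≤ ↑p.length + ((c :: rest).length : Int)) then (index - ↑p.length).toNat else (c :: rest).length)
            = (if (((p ++ [c]).length : Int) ≤ index ∧ index ≤ ((p ++ [c]).length : Int) + (rest.length : Int)) then (index - ((p ++ [c]).length : Int)).toNat else rest.length) + 1 := by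
          simp only [List.length_append, List.length_cons, List.length_nil]
          push_cast
          split_ifs <;> omega
        rw [step, ih (p ++ [c]) index]
        dsimp only
        rw [hk]
        simp [List.take_succ_cons, List.drop_succ_cons]

theorem pvWhileA_spec (l : List Char) : ∀ (current : Int),
    pvWhileA l current = current + ((l.takeWhile (fun c => c ≠ '\n')).length : Int) := by
  induction l with
  | nil => simp [pvWhileA]
  | cons c rest ih =>
      intro cur
      by_cases hc : c = '\n' <;> simp [pvWhileA, hc, ih] <;> ring

-- single-character find: position of the first occurrence, as a takeWhile length
theorem pvFindGo_singleton (a : Char) (l : List Char) : ∀ (k : Nat),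
    PySem.Chars.find.go [a] l k = if a ∈ l then ((k + (l.takeWhile (fun c => c ≠ a)).length : Nat) : Int) else -1 := by
  induction l with
  | nil => simp [PySem.Chars.find.go]
  | cons c rest ih =>
      intro k
      by_cases hc : a = c
      · subst hc; simp [PySem.Chars.find.go, List.isPrefixOf]
      · simp [PySem.Chars.find.go, List.isPrefixOf, hc, ih, Ne.symm hc]
        split <;> push_cast <;> ring

theorem pvFind_singleton (a : Char) (l : List Char) :
    PySem.Chars.find l [a] = if a ∈ l then ((l.takeWhile (fun c => c ≠ a)).length : Int) else -1 := by
  rw [PySem.Chars.find, pvFindGo_singleton]; simp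

-- single-character count is List.count
theorem pvCountGo_singleton (a : Char) (l : List Char) : ∀ (fuel acc : Nat), l.length ≤ fuel →
    PySem.Chars.count.go [a] fuel l acc = acc + l.count a := by
  induction l with
  | nil => intro fuel acc h; cases fuel <;> simp [PySem.Chars.count.go]
  | cons c rest ih =>
      intro fuel acc h
      cases fuel with
      | zero => simp at h
      | succ f =>
          by_cases hc : a = c
          · subst hc
            simp [PySem.Chars.count.go, List.isPrefixOf, ih f (acc + 1) (by simpa using h)]
            ring
          · simp [PySem.Chars.count.go, List.isPrefixOf, hc, ih f acc (by simpa using h), Ne.symm hc]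

theorem pvCount_singleton (a : Char) (l : List Char) :
    PySem.Chars.count l [a] = l.count a := by
  rw [PySem.Chars.count]; simp [pvCountGo_singleton a l l.length 0 le_rfl]

-- both result tuples, componentwise, for a consumed prefix of k = clamp(index) characters
theorem pvComponents (source : String) (k : Nat) (hk : k ≤ source.toList.length) (i : Int) (hi : i = (k : Int)) :
    ((1 + (((source.toList.take k).count '\n' : Nat) : Int),
      pvColF (source.toList.take k),
      PySem.Str.slice source (some (((source.toList.take k).length : Int) - pvColF (source.toList.take k)))
        (some (pvWhileA (source.toList.drop k) ((source.toList.take k).length : Int))))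
      : Int × Int × String)
    =
    ((PySem.Str.count (PySem.Str.slice source none (some i)) "\n" : Int) + 1,
     (if PySem.Str.find ((PySem.Str.slice? (PySem.Str.slice source none (some i)) none none (-1)).getD "") "\n" = -1
        then i
        else PySem.Str.find ((PySem.Str.slice? (PySem.Str.slice source none (some i)) none none (-1)).getD "") "\n"),
     PySem.Str.slice source
       (some (i - (if PySem.Str.find ((PySem.Str.slice? (PySem.Str.slice source none (some i)) none none (-1)).getD "") "\n" = -1
          then i
          else PySem.Str.find ((PySem.Str.slice? (PySem.Str.slice source none (some i)) none none (-1)).getD "") "\n")))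
       (some (if PySem.Str.findFrom source "\n" i none = -1 then PySem.Str.len source
              else PySem.Str.findFrom source "\n" i none))) := by
  have htl : (source.toList.take k).length = k := by rw [List.length_take]; omega
  -- pre.toList = take k
  have hpre : (PySem.Str.slice source none (some i)).toList = source.toList.take k := by
    rw [hi]
    rw [PySem.Str.toList_slice, PySem.Chars.slice_eq_listSlice,
       PySem.List.slice_to source.toList (by omega : (0:Int) ≤ (k:Int))]
    simp
  -- the reversed-find value
  have hj : PySem.Str.find ((PySem.Str.slice? (PySem.Str.slice source none (some i)) none none (-1)).getD "") "\n"
      = (if '\n' ∈ (source.toList.take k) then (((source.toList.take k).reverse.takeWhile (fun c => c ≠ '\n')).length : Int) else -1) := by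
    rw [PySem.Str.slice?_none_none_neg_one]
    simp only [Option.getD_some, PySem.Str.find_eq, hpre]
    have : (String.ofList (source.toList.take k).reverse).toList = (source.toList.take k).reverse := by simp
    rw [this]
    have hb : ("\n" : String).toList = ['\n'] := by decide
    rw [hb, pvFind_singleton]
    simp
  have hcol : (if PySem.Str.find ((PySem.Str.slice? (PySem.Str.slice source none (some i)) none none (-1)).getD "") "\n" = -1
        then i
        else PySem.Str.find ((PySem.Str.slice? (PySem.Str.slice source none (some i)) none none (-1)).getD "") "\n")
      = pvColF (source.toList.take k) := by
    rw [hj]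
    by_cases hm : '\n' ∈ source.toList.take k
    · rw [if_pos hm, if_neg (by omega : ¬((((source.toList.take k).reverse.takeWhile (fun c => c ≠ '\n')).length : Int) = -1))]
      rw [pvColF_eq_takeWhile_reverse]
    · rw [if_neg hm, if_pos rfl, pvColF_of_not_mem _ hm, htl, hi]
  have hend : (if PySem.Str.findFrom source "\n" i none = -1 then PySem.Str.len source
              else PySem.Str.findFrom source "\n" i none)
      = pvWhileA (source.toList.drop k) ((source.toList.take k).length : Int) := by
    rw [pvWhileA_spec, htl]
    have hb : ("\n" : String).toList = ['\n'] := by decide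
    rw [PySem.Str.findFrom_eq, hb, hi, PySem.Chars.findFrom_natCast source.toList ['\n'] k hk]
    rw [pvFind_singleton]
    by_cases hm : '\n' ∈ source.toList.drop k
    · rw [if_pos hm]
      have h1 : ((k:Int) + (((source.toList.drop k).takeWhile (fun c => c ≠ '\n')).length : Int)) ≠ -1 := by omega
      rw [if_neg (by omega : ¬(((((source.toList.drop k).takeWhile (fun c => c ≠ '\n')).length :Nat):Int) = -1)), if_neg h1]
    · rw [if_neg hm]
      simp only [reduceIte]
      have : (source.toList.drop k).takeWhile (fun c => c ≠ '\n') = source.toList.drop k := by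
        rw [List.takeWhile_eq_self_iff]
        intro x hx; simp; intro he; exact hm (he ▸ hx)
      rw [this, PySem.Str.len_eq]
      have := List.length_drop (l := source.toList) (i := k)
      omega
  refine Prod.ext ?_ (Prod.ext ?_ ?_)
  · dsimp only
    simp only [PySem.Str.count_eq, hpre]
    have hb : ("\n" : String).toList = ['\n'] := by decide
    rw [hb, pvCount_singleton]
    ring
  · dsimp only
    exact hcol.symm
  · dsimp only
    rw [hcol, hend, htl, hi]



theorem pvMain (source : String) (index : Int) :
    get_snippet_line_col source index = get_snippet_line_col_alt source index := by
  unfold get_snippet_line_col get_snippet_line_col_alt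
  have hA0 := pvLoopA_spec source.toList [] index
  simp only [List.count_nil, List.length_nil, pvColF_nil, CharP.cast_eq_zero,
    add_zero, zero_add, sub_zero, List.nil_append] at hA0
  have hlen : PySem.Str.len source = (source.toList.length : Int) := PySem.Str.len_eq source
  by_cases hio : 0 ≤ index ∧ index ≤ (source.toList.length : Int)
  case pos =>
    rw [if_pos hio] at hA0
    dsimp only
    rw [hA0]
    dsimp only
    rw [hlen, if_pos hio]
    exact pvComponents source index.toNat (by omega) index (by omega)
  case neg =>
    rw [if_neg hio] at hA0
    dsimp only
    rw [hA0]
    dsimp only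
    rw [hlen, if_neg hio]
    exact pvComponents source source.toList.length le_rfl (source.toList.length : Int) rfl

-- ===== VERDICT (by name: the statement is the Claim_ definition above) =====
theorem get_snippet_line_col_spec : Claim_equal_get_snippet_line_col := by
  intro source index _
  unfold Spec_get_snippet_line_col
  exact pvMain source index
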